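-- pv_equiv track=rewrite | github.com/edw1n94/k8s-edge-scheduler | src/k8s_distribute_pods.py | distribute_round_robin
-- ===== SOURCE A (Python) =====
-- def distribute_round_robin(replicas,node_list,quota_list):
--
--     index_replicas = 0
--     index_quota_list = 0
--
--     while index_replicas < replicas:
--         quota_list[index_quota_list] += 1
--         index_replicas += 1
--         index_quota_list += 1
--
--         if index_replicas % len(quota_list) == 0:
--             index_quota_list = 0
--
--     return quota_list
-- ===== SOURCE B (Python) =====
-- def distribute_round_robin(replicas, node_list, quota_list):
--     # Closed form: each node gets replicas//n, the first replicas%n nodes one extra.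
--     # Mutates quota_list in place, like the original.
--     if replicas > 0:
--         q, r = divmod(replicas, len(quota_list))
--         quota_list[:r] = [v + q + 1 for v in quota_list[:r]]
--         quota_list[r:] = [v + q for v in quota_list[r:]]
--     return quota_list
-- ===== Notes on version B (the rewrite author's own statement) =====
-- stated objective: alternative
-- what changed: Replaces the one-increment-per-replica round-robin loop (O(replicas) steps) by a closed-form divmod: every node gets replicas//n and the first replicas%n nodes one extra, written in two slice assignments; a timing run did not confirm a >=1.5x speed-up on its inputs.
import Mathlib
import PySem

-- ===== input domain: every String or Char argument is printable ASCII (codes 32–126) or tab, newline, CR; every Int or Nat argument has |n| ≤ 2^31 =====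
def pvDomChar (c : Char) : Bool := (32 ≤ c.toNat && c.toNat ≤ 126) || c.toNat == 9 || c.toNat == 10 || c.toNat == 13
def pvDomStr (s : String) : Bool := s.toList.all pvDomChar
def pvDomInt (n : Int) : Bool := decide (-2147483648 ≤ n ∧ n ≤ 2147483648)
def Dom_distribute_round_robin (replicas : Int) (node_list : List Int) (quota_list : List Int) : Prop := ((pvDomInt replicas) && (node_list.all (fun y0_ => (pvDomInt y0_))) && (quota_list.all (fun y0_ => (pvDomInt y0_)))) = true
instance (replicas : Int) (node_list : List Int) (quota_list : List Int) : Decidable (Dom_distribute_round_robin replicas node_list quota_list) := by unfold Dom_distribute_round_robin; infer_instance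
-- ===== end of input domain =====

-- B replaces A's one-increment-per-replica loop by a closed-form divmod over the quota list (alternative algorithm).
-- Both A and B mutate quota_list in place in Python; the equivalence proved here is about the return value.

-- ===== PORT A =====
-- the while loop of A: state (index_replicas = ir, index_quota_list = iq, quota_list = q)
def pvLoopA (replicas : Int) (ir : Int) (iq : Int) (q : List Int) : List Int :=
  if ir < replicas then
    match PySem.List.pyGet? q iq with
    | none => q  -- IndexError (quota_list empty); excluded by Pre_
    | some v =>
      let q' := PySem.List.pySetD q iq (v + 1)
      let iq' := if PySem.Int.mod (ir + 1) (q'.length : Int) = 0 then 0 else iq + 1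
      pvLoopA replicas (ir + 1) iq' q'
  else q
termination_by (replicas - ir).toNat
decreasing_by omega

def distribute_round_robin (replicas : Int) (node_list : List Int) (quota_list : List Int) : List Int :=
  pvLoopA replicas 0 0 quota_list

-- ===== PORT B =====
def distribute_round_robin_alt (replicas : Int) (node_list : List Int) (quota_list : List Int) : List Int :=
  if replicas > 0 then
    match PySem.Int.divmod? replicas (quota_list.length : Int) with
    | none => quota_list  -- ZeroDivisionError (quota_list empty); excluded by Pre_
    | some (q, r) =>
        (PySem.List.slice quota_list none (some r)).map (fun v => v + q + 1) ++
          (PySem.List.slice quota_list (some r) none).map (fun v => v + q)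
  else quota_list

-- ===== PRECONDITION & SPEC =====
-- Pre_ excludes exactly the inputs where A raises: replicas > 0 with an empty quota_list
-- (A raises IndexError there; B raises ZeroDivisionError).
def Pre_distribute_round_robin (replicas : Int) (node_list : List Int) (quota_list : List Int) : Prop :=
  replicas ≤ 0 ∨ quota_list ≠ []
instance (replicas : Int) (node_list : List Int) (quota_list : List Int) : Decidable (Pre_distribute_round_robin replicas node_list quota_list) := by unfold Pre_distribute_round_robin; infer_instance

def pvWitness_distribute_round_robin : Int × List Int × List Int := (5, [10, 20], [1, 2, 3])

def Spec_distribute_round_robin (replicas : Int) (node_list : List Int) (quota_list : List Int) (out : List Int) : Prop := out = distribute_round_robin_alt replicas node_list quota_list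
instance (replicas : Int) (node_list : List Int) (quota_list : List Int) (out : List Int) : Decidable (Spec_distribute_round_robin replicas node_list quota_list out) := by unfold Spec_distribute_round_robin; infer_instance

-- ===== CLAIM (what is proved, stated in full; the proofs are below) =====
def Claim_equal_distribute_round_robin : Prop := ∀ (replicas : Int) (node_list : List Int) (quota_list : List Int), Dom_distribute_round_robin replicas node_list quota_list → Pre_distribute_round_robin replicas node_list quota_list → Spec_distribute_round_robin replicas node_list quota_list (distribute_round_robin replicas node_list quota_list)

-- ===== LEMMAS AND PROOFS =====

-- count of k in [s, s+m) with k % n = i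
def pvCnt (s m n i : Nat) : Nat :=
  match m with
  | 0 => 0
  | m' + 1 => (if s % n = i then 1 else 0) + pvCnt (s + 1) m' n i

lemma pvCnt_snoc (s m n i : Nat) :
    pvCnt s (m + 1) n i = pvCnt s m n i + (if (s + m) % n = i then 1 else 0) := by
  induction m generalizing s with
  | zero => simp [pvCnt]
  | succ m ih =>
      rw [pvCnt, ih, pvCnt]
      have : s + 1 + m = s + (m + 1) := by omega
      rw [this]; ring

lemma pv_succ_div_mod (R n : Nat) (hn : 0 < n) :
    ((R % n + 1 = n → (R + 1) / n = R / n + 1 ∧ (R + 1) % n = 0) ∧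
     (R % n + 1 ≠ n → (R + 1) / n = R / n ∧ (R + 1) % n = R % n + 1)) := by
  have hdm := Nat.div_add_mod R n
  have hlt := Nat.mod_lt R hn
  constructor
  · intro h
    have hR : R + 1 = n * (R / n + 1) := by rw [Nat.mul_add, Nat.mul_one]; omega
    constructor
    · rw [hR, Nat.mul_div_cancel_left _ hn]
    · rw [hR, Nat.mul_mod_right]
  · intro h
    have hR : R + 1 = n * (R / n) + (R % n + 1) := by omega
    constructor
    · rw [hR, Nat.mul_add_div hn]
      simp [Nat.div_eq_of_lt (show R % n + 1 < n by omega)]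
    · rw [hR, Nat.mul_add_mod, Nat.mod_eq_of_lt (by omega)]

lemma pvCnt_closed (R n i : Nat) (hn : 0 < n) (hi : i < n) :
    pvCnt 0 R n i = R / n + (if i < R % n then 1 else 0) := by
  induction R with
  | zero => simp [pvCnt]
  | succ R ih =>
      rw [pvCnt_snoc, ih]
      have hsm := pv_succ_div_mod R n hn
      have hlt := Nat.mod_lt R hn
      by_cases h : R % n + 1 = n
      · obtain ⟨hd, hm⟩ := hsm.1 h
        rw [hd, hm]
        simp only [Nat.zero_add]
        split_ifs <;> omega
      · obtain ⟨hd, hm⟩ := hsm.2 h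
        rw [hd, hm]
        simp only [Nat.zero_add]
        split_ifs <;> omega

lemma pv_int_mod_succ (ir n : Int) (hn : 0 < n) (hir : 0 ≤ ir) :
    (if PySem.Int.mod (ir + 1) n = 0 then (0:Int) else PySem.Int.mod ir n + 1) =
      PySem.Int.mod (ir + 1) n := by
  rw [PySem.Int.mod_eq_emod_of_pos hn, PySem.Int.mod_eq_emod_of_pos hn]
  have h1 : (ir + 1) % n = (ir % n + 1) % n := by
    conv_lhs => rw [show ir + 1 = (ir % n + 1) + n * (ir / n) by
      have := Int.emod_add_mul_ediv ir n; omega]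
    rw [Int.add_mul_emod_self_left]
  have hb0 : 0 ≤ ir % n := Int.emod_nonneg ir (by omega)
  have hbn : ir % n < n := Int.emod_lt_of_pos ir hn
  by_cases h : ir % n + 1 = n
  · have : (ir + 1) % n = 0 := by rw [h1, h]; simp
    simp [this]
  · have : (ir + 1) % n = ir % n + 1 := by
      rw [h1]; exact Int.emod_eq_of_lt (by omega) (by omega)
    simp [this]
    intro hc; omega

lemma pv_loopA_char (m : Nat) : ∀ (ir : Int) (q : List Int), 0 < q.length → 0 ≤ ir →
    pvLoopA (ir + m) ir (PySem.Int.mod ir (q.length : Int)) q =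
      q.mapIdx (fun i v => v + (pvCnt ir.toNat m q.length i : Int)) := by
  induction m with
  | zero =>
      intro ir q hq hir
      rw [pvLoopA]
      rw [if_neg (by omega)]
      apply List.ext_getElem <;> simp [pvCnt]
  | succ m ih =>
      intro ir q hq hir
      have hn : (0:Int) < (q.length : Int) := by exact_mod_cast hq
      have hmod0 : 0 ≤ PySem.Int.mod ir (q.length : Int) := PySem.Int.mod_nonneg _ hn
      have hmodlt : PySem.Int.mod ir (q.length : Int) < (q.length : Int) := PySem.Int.mod_lt _ hn
      rw [pvLoopA]
      have hcond : ir < ir + ((m : Nat) + 1 : Nat) := by push_cast; omega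
      rw [if_pos hcond]
      rw [PySem.List.pyGet?_eq_some_getElem q hmod0 hmodlt]
      simp only
      set j : Nat := (PySem.Int.mod ir (q.length : Int)).toNat with hj
      have hjlt : j < q.length := by omega
      have hset : PySem.List.pySetD q (PySem.Int.mod ir (q.length : Int)) (q[j] + 1) =
          q.set j (q[j] + 1) := PySem.List.pySetD_of_nonneg q _ hmod0
      rw [hset]
      have hlen : (q.set j (q[j] + 1)).length = q.length := by simp
      rw [hlen]
      rw [pv_int_mod_succ ir (q.length : Int) hn hir]
      have harg : ir + ((m : Nat) + 1 : Nat) = (ir + 1) + (m : Nat) := by push_cast; ring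
      rw [harg]
      have ih' := ih (ir + 1) (q.set j (q[j] + 1)) (by simp [hq]) (by omega)
      rw [hlen] at ih'
      rw [ih']
      -- pointwise comparison
      apply List.ext_getElem
      · simp
      · intro i h1 h2
        have hi : i < q.length := by simpa using h1
        simp only [List.getElem_mapIdx, List.getElem_set]
        have htn : ((ir + 1)).toNat = ir.toNat + 1 := by omega
        simp only [htn]
        have hcnt : pvCnt ir.toNat (m + 1) q.length i =
            (if ir.toNat % q.length = i then 1 else 0) + pvCnt (ir.toNat + 1) m q.length i := rfl
        rw [hcnt]
        have hjval : j = ir.toNat % q.length := by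
          rw [hj, PySem.Int.mod_eq_emod_of_pos hn]
          have : ir % (q.length : Int) = ((ir.toNat % q.length : Nat) : Int) := by
            rw [show ir = ((ir.toNat : Nat) : Int) by omega]
            exact (Int.natCast_mod ir.toNat q.length).symm
          omega
        by_cases hij : j = i
        · rw [if_pos hij, if_pos (by omega)]
          subst hij; push_cast; ring
        · rw [if_neg hij, if_neg (by omega)]
          push_cast; ring

lemma pv_alt_char (replicas : Int) (node_list quota_list : List Int)
    (hpos : 0 < replicas) (hne : 0 < quota_list.length) :
    distribute_round_robin_alt replicas node_list quota_list =
      quota_list.mapIdx (fun i v =>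
        v + (pvCnt 0 replicas.toNat quota_list.length i : Int)) := by
  unfold distribute_round_robin_alt
  rw [if_pos hpos]
  set n := quota_list.length with hn
  have hn0 : (n : Int) ≠ 0 := by omega
  have hrep : replicas = ((replicas.toNat : Nat) : Int) := by omega
  have hdm : PySem.Int.divmod? replicas (n : Int) =
      some (((replicas.toNat / n : Nat) : Int), ((replicas.toNat % n : Nat) : Int)) := by
    conv_lhs => rw [hrep]
    unfold PySem.Int.divmod?
    rw [if_neg hn0]
    exact congrArg some (Prod.ext_iff.mpr
      ⟨PySem.Int.floordiv_natCast _ _, PySem.Int.mod_natCast _ _⟩)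
  rw [hdm]
  dsimp only
  set k := replicas.toNat % n with hk
  have hkn : k < n := Nat.mod_lt _ (by omega)
  rw [PySem.List.slice_to_natCast, PySem.List.slice_from_natCast]
  apply List.ext_getElem
  · simp
    omega
  · intro i h1 h2
    have hi : i < n := by
      have : (List.mapIdx (fun i v => v + (pvCnt 0 replicas.toNat n i : Int)) quota_list).length = n := by
        simp [hn]
      omega
    simp only [List.getElem_mapIdx]
    rw [pvCnt_closed replicas.toNat n i (by omega) hi]
    have hlen1 : ((quota_list.take k).map (fun v => v + ((replicas.toNat / n : Nat) : Int) + 1)).length = k := by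
      simp [hn]; omega
    by_cases hik : i < k
    · rw [List.getElem_append_left (by omega)]
      rw [List.getElem_map, List.getElem_take]
      rw [if_pos hik]
      push_cast; ring
    · rw [List.getElem_append_right (by omega)]
      rw [List.getElem_map, List.getElem_drop]
      rw [if_neg hik]
      simp only [List.length_map, List.length_take]
      have hidx : k + (i - min k quota_list.length) = i := by
        have : min k quota_list.length = k := by omega
        omega
      simp only [hidx]
      push_cast; ring

-- ===== VERDICT (by name: the statement is the Claim_ definition above) =====
theorem distribute_round_robin_spec : Claim_equal_distribute_round_robin := by
  intro replicas node_list quota_list _hdom hpre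
  unfold Spec_distribute_round_robin
  by_cases hpos : 0 < replicas
  · have hne : quota_list ≠ [] := by
      rcases hpre with h | h
      · omega
      · exact h
    have hlen : 0 < quota_list.length := List.length_pos_iff.mpr hne
    have hmod0 : PySem.Int.mod 0 (quota_list.length : Int) = 0 := by
      rw [PySem.Int.mod_eq_emod_of_pos (by exact_mod_cast hlen)]
      simp
    unfold distribute_round_robin
    have hchar := pv_loopA_char replicas.toNat 0 quota_list hlen (by omega)
    rw [hmod0] at hchar
    rw [show (0 : Int) + ((replicas.toNat : Nat) : Int) = replicas by omega] at hchar
    rw [hchar, pv_alt_char replicas node_list quota_list hpos hlen]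
    simp [Int.toNat_zero]
  · unfold distribute_round_robin distribute_round_robin_alt
    rw [pvLoopA]
    rw [if_neg (by omega), if_neg hpos]
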